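-- pv_equiv track=rewrite | github.com/RZN1926/kbju_bot | recipe_engine.py | _resolve_key
-- ===== SOURCE A (Python) =====
-- def _resolve_key(norm: str, db: dict) -> str | None:
--     """Точное → частичное → по первому слову."""
--     if norm in db:
--         return norm
--     for key in db:
--         if norm in key or key in norm:
--             return key
--     fw = norm.split()[0] if norm.split() else norm
--     for key in db:
--         if key.startswith(fw) or fw in key:
--             return key
--     return None
-- ===== SOURCE B (Python) =====
-- def _resolve_key(norm: str, db: dict) -> str | None:
--     """Single pass: return key on substring overlap immediately; remember the
--     first first-word candidate as a fallback for after the loop."""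
--     if norm in db:
--         return norm
--     words = norm.split()
--     fw = words[0] if words else norm
--     fallback = None
--     for key in db:
--         if norm in key or key in norm:
--             return key
--         if fallback is None and (key.startswith(fw) or fw in key):
--             fallback = key
--     return fallback
-- ===== Notes on version B (the rewrite author's own statement) =====
-- stated objective: alternative
-- what changed: The two sequential scans of the dict (substring pass, then first-word pass) are merged into one loop that returns on a substring match and maintains the first first-word match as a fallback accumulator returned after the loop.
import Mathlib
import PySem

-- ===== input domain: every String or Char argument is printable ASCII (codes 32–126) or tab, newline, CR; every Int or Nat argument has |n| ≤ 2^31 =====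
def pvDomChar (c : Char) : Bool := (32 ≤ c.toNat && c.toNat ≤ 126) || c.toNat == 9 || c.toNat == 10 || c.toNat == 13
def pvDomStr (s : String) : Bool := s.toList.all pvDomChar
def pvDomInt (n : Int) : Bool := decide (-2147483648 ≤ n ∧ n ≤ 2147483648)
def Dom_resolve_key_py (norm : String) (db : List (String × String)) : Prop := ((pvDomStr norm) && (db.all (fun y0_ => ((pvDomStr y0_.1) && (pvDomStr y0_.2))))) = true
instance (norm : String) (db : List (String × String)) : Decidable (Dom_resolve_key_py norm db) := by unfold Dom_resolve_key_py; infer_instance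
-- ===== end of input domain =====

-- B merges A's two sequential scans into one loop with a fallback accumulator (alternative decomposition, same cost).


-- ===== PORT A =====
def resolve_key_py (norm : String) (db : List (String × String)) : Option String :=
  if db.any (fun kv => kv.1 == norm) then some norm
  else
    match db.find? (fun kv => PySem.Str.isIn norm kv.1 || PySem.Str.isIn kv.1 norm) with
    | some kv => some kv.1
    | none =>
      let fw := match PySem.Str.split₀ norm with
        | [] => norm
        | w :: _ => w
      match db.find? (fun kv => PySem.Str.startswith kv.1 fw || PySem.Str.isIn fw kv.1) with
      | some kv => some kv.1
      | none => none

-- ===== PORT B =====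
def resolveLoopB (norm fw : String) (fallback : Option String) : List (String × String) → Option String
  | [] => fallback
  | kv :: rest =>
    if PySem.Str.isIn norm kv.1 || PySem.Str.isIn kv.1 norm then some kv.1
    else
      resolveLoopB norm fw
        (if fallback.isNone && (PySem.Str.startswith kv.1 fw || PySem.Str.isIn fw kv.1)
         then some kv.1 else fallback) rest

def resolve_key_py_alt (norm : String) (db : List (String × String)) : Option String :=
  if db.any (fun kv => kv.1 == norm) then some norm
  else
    let fw := match PySem.Str.split₀ norm with
      | [] => norm
      | w :: _ => w
    resolveLoopB norm fw none db

-- ===== PRECONDITION & SPEC =====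
def Spec_resolve_key_py (norm : String) (db : List (String × String)) (out : Option String) : Prop := out = resolve_key_py_alt norm db
instance (norm : String) (db : List (String × String)) (out : Option String) : Decidable (Spec_resolve_key_py norm db out) := by unfold Spec_resolve_key_py; infer_instance

-- ===== CLAIM (what is proved, stated in full; the proofs are below) =====
def Claim_equal_resolve_key_py : Prop := ∀ (norm : String) (db : List (String × String)), Dom_resolve_key_py norm db → Spec_resolve_key_py norm db (resolve_key_py norm db)

-- ===== LEMMAS AND PROOFS =====
def loopG (p q : String × String → Bool) (fb : Option String) : List (String × String) → Option String
  | [] => fb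
  | kv :: rest =>
    if p kv then some kv.1
    else loopG p q (if fb.isNone && q kv then some kv.1 else fb) rest

lemma resolveLoopB_eq_loopG (norm fw : String) (fb : Option String) (db : List (String × String)) :
    resolveLoopB norm fw fb db =
      loopG (fun kv => PySem.Str.isIn norm kv.1 || PySem.Str.isIn kv.1 norm)
            (fun kv => PySem.Str.startswith kv.1 fw || PySem.Str.isIn fw kv.1) fb db := by
  induction db generalizing fb with
  | nil => rfl
  | cons kv rest ih => simp only [resolveLoopB, loopG]; rw [ih]

lemma loopG_eq (p q : String × String → Bool) (fb : Option String) (db : List (String × String)) :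
    loopG p q fb db =
      match db.find? p with
      | some kv => some kv.1
      | none =>
        match fb with
        | some f => some f
        | none => (db.find? q).map Prod.fst := by
  induction db generalizing fb with
  | nil => cases fb <;> rfl
  | cons kv rest ih =>
    by_cases hp : p kv = true
    · rw [List.find?_cons_of_pos hp]
      simp only [loopG, if_pos hp]
    · rw [List.find?_cons_of_neg hp]
      simp only [loopG, if_neg hp]
      cases fb with
      | some f =>
        rw [ih]
        have hc : ¬ (((some f : Option String).isNone && q kv) = true) := by simp
        rw [if_neg hc]
      | none =>
        by_cases hq : q kv = true
        · rw [List.find?_cons_of_pos hq]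
          have hc : (Option.isNone (none : Option String) && q kv) = true := by simp [hq]
          simp only [if_pos hc, ih]
          cases List.find? p rest <;> rfl
        · rw [List.find?_cons_of_neg hq]
          have hc : ¬ (Option.isNone (none : Option String) && q kv) = true := by simp [hq]
          simp only [if_neg hc, ih]

lemma resolveLoopB_eq (norm fw : String) (fb : Option String) (db : List (String × String)) :
    resolveLoopB norm fw fb db =
      match db.find? (fun kv => PySem.Str.isIn norm kv.1 || PySem.Str.isIn kv.1 norm) with
      | some kv => some kv.1
      | none =>
        match fb with
        | some f => some f
        | none => (db.find? (fun kv => PySem.Str.startswith kv.1 fw || PySem.Str.isIn fw kv.1)).map Prod.fst := by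
  rw [resolveLoopB_eq_loopG, loopG_eq]

-- ===== VERDICT (by name: the statement is the Claim_ definition above) =====
theorem resolve_key_py_spec : Claim_equal_resolve_key_py := by
  intro norm db _
  unfold Spec_resolve_key_py resolve_key_py resolve_key_py_alt
  by_cases hg : db.any (fun kv => kv.1 == norm) = true
  · simp [hg]
  · simp only [hg, resolveLoopB_eq]
    cases db.find? (fun kv => PySem.Str.isIn norm kv.1 || PySem.Str.isIn kv.1 norm) with
    | some kv => rfl
    | none =>
      cases h : db.find? (fun kv =>
          PySem.Str.startswith kv.1 (match PySem.Str.split₀ norm with | [] => norm | w :: _ => w)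
          || PySem.Str.isIn (match PySem.Str.split₀ norm with | [] => norm | w :: _ => w) kv.1) <;>
        simp
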